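-- pv_equiv track=rewrite | github.com/pypi-data/pypi-mirror-399 | packages/discrete-math-toolkit/discrete_math_toolkit-0.2.0-py3-none-any.whl/discrete_math/relations.py | relation_matrix
-- ===== SOURCE A (Python) =====
-- from typing import Set, Tuple, Dict, List
--
-- Relation = Set[Tuple]
--
-- def relation_matrix(relation: Relation, domain: Set) -> List[List[int]]:
--     """
--     Convert a relation to its matrix representation.
--
--     Args:
--         relation: Set of ordered pairs representing the relation
--         domain: The domain set
--
--     Returns:
--         Matrix representation (2D list) where M[i][j] = 1 if (i, j) ∈ R
--
--     Example:
--         >>> relation_matrix({(1, 2), (2, 3)}, {1, 2, 3})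
--         [[0, 1, 0], [0, 0, 1], [0, 0, 0]]
--     """
--     domain_list = sorted(domain)
--     n = len(domain_list)
--     matrix = [[0] * n for _ in range(n)]
--
--     index_map = {elem: i for i, elem in enumerate(domain_list)}
--
--     for a, b in relation:
--         if a in index_map and b in index_map:
--             matrix[index_map[a]][index_map[b]] = 1
--
--     return matrix
-- ===== SOURCE B (Python) =====
-- def relation_matrix(relation, domain):
--     domain_list = sorted(domain)
--     return [[1 if (a, b) in relation else 0 for b in domain_list]
--             for a in domain_list]
-- ===== Notes on version B (the rewrite author's own statement) =====
-- stated objective: idiomatic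
-- what changed: Replaces A's allocate-zero-matrix + elem-to-index dict + scatter-1s pass over the relation with a direct nested comprehension over sorted-domain pairs testing relation membership per cell.
import Mathlib
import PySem

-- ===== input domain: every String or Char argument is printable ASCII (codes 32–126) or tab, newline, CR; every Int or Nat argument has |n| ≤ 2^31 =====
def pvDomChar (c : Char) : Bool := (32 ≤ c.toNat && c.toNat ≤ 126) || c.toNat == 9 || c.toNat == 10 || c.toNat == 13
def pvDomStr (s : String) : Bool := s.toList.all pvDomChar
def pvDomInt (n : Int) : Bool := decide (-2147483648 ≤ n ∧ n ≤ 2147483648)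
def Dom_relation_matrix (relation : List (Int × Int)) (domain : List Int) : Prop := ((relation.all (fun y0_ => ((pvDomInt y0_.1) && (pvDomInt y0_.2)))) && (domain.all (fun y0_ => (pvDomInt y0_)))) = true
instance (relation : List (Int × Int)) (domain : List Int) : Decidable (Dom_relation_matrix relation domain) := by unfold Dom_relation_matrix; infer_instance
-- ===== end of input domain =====

-- B replaces A's zero-matrix + index-map + scatter pass with a direct nested
-- comprehension over sorted-domain pairs testing relation membership (idiomatic).

-- ===== PORT A =====
def relation_matrix (relation : List (Int × Int)) (domain : List Int) : List (List Int) :=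
  let domain_list := PySem.List.sorted domain (fun x => x) false
  let n := domain_list.length
  -- [[0] * n for _ in range(n)]
  let matrix := (PySem.List.pyRange 0 (n : Int) 1).map (fun _ => List.replicate n (0 : Int))
  -- {elem: i for i, elem in enumerate(domain_list)}
  let index_map := (PySem.List.enumerate domain_list 0).foldl
      (fun (d : PySem.Dict Int Int) p => d.insert p.2 p.1) PySem.Dict.empty
  relation.foldl (fun m p =>
    if index_map.contains p.1 && index_map.contains p.2 then
      -- matrix[index_map[a]][index_map[b]] = 1 ; the dict values are valid
      -- nonnegative row/column indices, so plain Nat indexing is exact here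
      m.set ((index_map.getD p.1 0).toNat)
        ((m.getD ((index_map.getD p.1 0).toNat) []).set ((index_map.getD p.2 0).toNat) 1)
    else m) matrix

-- ===== PORT B =====
def relation_matrix_alt (relation : List (Int × Int)) (domain : List Int) : List (List Int) :=
  let domain_list := PySem.List.sorted domain (fun x => x) false
  domain_list.map (fun a => domain_list.map (fun b => if (a, b) ∈ relation then (1 : Int) else 0))

-- ===== PRECONDITION & SPEC =====
-- `domain` is a Python set, so its list encoding carries DISTINCT elements; Pre_
-- excludes duplicate-bearing encodings, which denote no Python input (the set
-- dedups, so no list-level port can be faithful on them).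
def Pre_relation_matrix (relation : List (Int × Int)) (domain : List Int) : Prop := domain.Nodup
instance (relation : List (Int × Int)) (domain : List Int) : Decidable (Pre_relation_matrix relation domain) := by unfold Pre_relation_matrix; infer_instance
def pvWitness_relation_matrix : (List (Int × Int)) × List Int := ([(1, 2), (2, 3)], [1, 2, 3])

def Spec_relation_matrix (relation : List (Int × Int)) (domain : List Int) (out : List (List Int)) : Prop := out = relation_matrix_alt relation domain
instance (relation : List (Int × Int)) (domain : List Int) (out : List (List Int)) : Decidable (Spec_relation_matrix relation domain out) := by unfold Spec_relation_matrix; infer_instance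

-- ===== CLAIM (what is proved, stated in full; the proofs are below) =====
def Claim_equal_relation_matrix : Prop := ∀ (relation : List (Int × Int)) (domain : List Int), Dom_relation_matrix relation domain → Pre_relation_matrix relation domain → Spec_relation_matrix relation domain (relation_matrix relation domain)

-- ===== LEMMAS AND PROOFS =====

-- the matrix viewed as a function of the (distinct) domain elements
def pvGrid (d : List Int) (g : Int → Int → Int) : List (List Int) :=
  d.map (fun x => d.map (fun y => g x y))

-- A's element → index dictionary
def pvIdx (d : List Int) : PySem.Dict Int Int :=
  (PySem.List.enumerate d 0).foldl
    (fun (m : PySem.Dict Int Int) p => m.insert p.2 p.1) PySem.Dict.empty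

theorem pvGrid_congr {d : List Int} {g g' : Int → Int → Int}
    (h : ∀ x ∈ d, ∀ y ∈ d, g x y = g' x y) : pvGrid d g = pvGrid d g' := by
  unfold pvGrid
  apply List.map_congr_left
  intro x hx
  exact List.map_congr_left (fun y hy => h x hx y hy)

theorem pv_map_set {α : Type} (d : List Int) (hnd : d.Nodup) (j : Nat) (b : Int)
    (hj : d[j]? = some b) (f f' : Int → α) (v : α)
    (hmod : ∀ y ∈ d, f' y = if y = b then v else f y) :
    (d.map f).set j v = d.map f' := by
  have hjl : j < d.length := by
    by_contra h
    simp [List.getElem?_eq_none (le_of_not_gt h)] at hj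
  have hjb : d[j] = b := by
    have := List.getElem?_eq_getElem hjl (l := d)
    rw [this] at hj; exact Option.some_injective _ hj
  apply List.ext_getElem (by simp)
  intro k hk1 hk2
  simp only [List.length_set, List.length_map] at hk1
  rw [List.getElem_set]
  by_cases hkj : j = k
  · subst hkj
    simp [hmod b (by rw [← hjb]; exact List.getElem_mem hjl), hjb]
  · have hkb : d[k] ≠ b := by
      intro he
      exact hkj ((hnd.getElem_inj_iff).mp (hjb.trans he.symm))
    simp only [if_neg hkj, List.getElem_map]
    rw [hmod d[k] (List.getElem_mem hk1), if_neg hkb]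

theorem pvIdx_items (d : List Int) (hnd : d.Nodup) :
    (pvIdx d).items = (PySem.List.enumerate d 0).map (fun p => (p.2, p.1)) := by
  unfold pvIdx
  have := PySem.Dict.items_foldl_insert_fresh (l := PySem.List.enumerate d 0)
    (k := fun p => p.2) (v := fun p => p.1) (d := (PySem.Dict.empty : PySem.Dict Int Int))
    (by intro a _; simp [PySem.Dict.contains_empty])
    (by rw [PySem.List.map_snd_enumerate]; exact hnd)
  simpa using this

theorem pvIdx_keys (d : List Int) (hnd : d.Nodup) : (pvIdx d).keys = d := by
  simp only [PySem.Dict.keys, pvIdx_items d hnd, List.map_map]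
  rw [show ((fun (x : Int × Int) => x.1) ∘ fun (p : Int × Int) => (p.2, p.1))
        = (fun (p : Int × Int) => p.2) from rfl]
  exact PySem.List.map_snd_enumerate (xs := d) (s := 0)

theorem pvIdx_contains (d : List Int) (hnd : d.Nodup) (a : Int) :
    (pvIdx d).contains a = true ↔ a ∈ d := by
  rw [PySem.Dict.contains_iff_mem_keys, pvIdx_keys d hnd]

theorem pvIdx_get (d : List Int) (hnd : d.Nodup) (i : Nat) (a : Int)
    (h : i < d.length) (ha : d[i] = a) : (pvIdx d).get? a = some (i : Int) := by
  apply PySem.Dict.get?_of_mem_items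
  · rw [pvIdx_items d hnd]
    refine List.mem_map.mpr ⟨((i : Int), a), ?_, rfl⟩
    rw [PySem.List.mem_enumerate_iff]
    exact ⟨i, h, by simp [ha]⟩
  · rw [pvIdx_keys d hnd]; exact hnd

theorem pv_setcell (d : List Int) (hnd : d.Nodup) (i j : Nat) (a b : Int)
    (hi : i < d.length) (ha : d[i] = a) (hj : j < d.length) (hb : d[j] = b)
    (g : Int → Int → Int) :
    (pvGrid d g).set i (((pvGrid d g).getD i []).set j (1 : Int))
      = pvGrid d (fun x y => if x = a ∧ y = b then (1 : Int) else g x y) := by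
  have hj' : d[j]? = some b := by rw [List.getElem?_eq_getElem hj, hb]
  have hi' : d[i]? = some a := by rw [List.getElem?_eq_getElem hi, ha]
  have hrow : (pvGrid d g).getD i [] = d.map (fun y => g a y) := by
    unfold pvGrid
    rw [List.getD_eq_getElem?_getD, List.getElem?_map, hi']
    simp
  have hinner : (d.map (fun y => g a y)).set j (1 : Int)
      = d.map (fun y => if y = b then (1 : Int) else g a y) := by
    apply pv_map_set d hnd j b hj'
    intro y _
    by_cases hyb : y = b <;> simp [hyb]
  rw [hrow, hinner]
  have houter := pv_map_set d hnd i a hi'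
    (fun x => d.map (fun y => g x y))
    (fun x => d.map (fun y => if x = a ∧ y = b then (1 : Int) else g x y))
    (d.map (fun y => if y = b then (1 : Int) else g a y))
    (by intro x _
        by_cases hxa : x = a
        · simp only [hxa, if_pos trivial]
          apply List.map_congr_left; intro y _; simp
        · simp only [if_neg hxa]
          apply List.map_congr_left; intro y _; simp [hxa])
  exact houter

theorem pv_fold (d : List Int) (hnd : d.Nodup) :
    ∀ (rel : List (Int × Int)) (g : Int → Int → Int),
    rel.foldl (fun m p =>
      if (pvIdx d).contains p.1 && (pvIdx d).contains p.2 then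
        m.set (((pvIdx d).getD p.1 0).toNat)
          ((m.getD (((pvIdx d).getD p.1 0).toNat) []).set (((pvIdx d).getD p.2 0).toNat) 1)
      else m) (pvGrid d g)
    = pvGrid d (fun x y => if (x, y) ∈ rel then 1 else g x y) := by
  intro rel
  induction rel with
  | nil =>
    intro g
    simp only [List.foldl_nil]
    exact pvGrid_congr (by intro x _ y _; simp)
  | cons p t ih =>
    intro g
    obtain ⟨a, b⟩ := p
    simp only [List.foldl_cons]
    by_cases hab : a ∈ d ∧ b ∈ d
    · obtain ⟨i, hi, ha⟩ := List.mem_iff_getElem.mp hab.1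
      obtain ⟨j, hj, hb⟩ := List.mem_iff_getElem.mp hab.2
      have hca : (pvIdx d).contains a = true := (pvIdx_contains d hnd a).mpr hab.1
      have hcb : (pvIdx d).contains b = true := (pvIdx_contains d hnd b).mpr hab.2
      have hga : (pvIdx d).getD a 0 = (i : Int) :=
        PySem.Dict.getD_of_get?_eq_some _ 0 (pvIdx_get d hnd i a hi ha)
      have hgb : (pvIdx d).getD b 0 = (j : Int) :=
        PySem.Dict.getD_of_get?_eq_some _ 0 (pvIdx_get d hnd j b hj hb)
      simp only [hca, hcb, Bool.and_self, if_pos, hga, hgb, Int.toNat_natCast]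
      rw [pv_setcell d hnd i j a b hi ha hj hb g, ih]
      apply pvGrid_congr
      intro x _ y _
      by_cases ht : (x, y) ∈ t
      · simp [ht, List.mem_cons]
      · by_cases hx : x = a ∧ y = b
        · simp [List.mem_cons, hx.1, hx.2]
        · have : ¬ ((x, y) = (a, b)) := by
            simp only [Prod.mk.injEq]; exact hx
          simp [List.mem_cons, this, ht, hx]
    · have hor : (pvIdx d).contains a ≠ true ∨ (pvIdx d).contains b ≠ true := by
        rcases not_and_or.mp hab with h | h
        · exact Or.inl (fun h' => h ((pvIdx_contains d hnd a).mp h'))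
        · exact Or.inr (fun h' => h ((pvIdx_contains d hnd b).mp h'))
      have hcc : ((pvIdx d).contains a && (pvIdx d).contains b) = false := by
        rcases hor with h | h <;> simp [Bool.not_eq_true] at h <;> simp [h]
      simp only [hcc, Bool.false_eq_true, if_false]
      rw [ih]
      apply pvGrid_congr
      intro x hx y hy
      have : ¬ ((x, y) = (a, b)) := by
        intro he
        rw [Prod.mk.injEq] at he
        exact hab ⟨he.1 ▸ hx, he.2 ▸ hy⟩
      simp [List.mem_cons, this]

theorem pv_init (d : List Int) :
    (PySem.List.pyRange 0 (d.length : Int) 1).map (fun _ => List.replicate d.length (0 : Int))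
      = pvGrid d (fun _ _ => (0 : Int)) := by
  unfold pvGrid
  rw [List.map_const', List.map_const', PySem.List.pyRange_zero_natCast]
  simp [List.map_const']

-- ===== VERDICT (by name: the statement is the Claim_ definition above) =====
theorem relation_matrix_spec : Claim_equal_relation_matrix := by
  intro relation domain _ hpre
  unfold Spec_relation_matrix
  have hnd : (PySem.List.sorted domain (fun x => x) false).Nodup :=
    ((PySem.List.sorted_perm (xs := domain) (key := fun x => x) (rev := false)).nodup_iff).mpr hpre
  dsimp only [relation_matrix, relation_matrix_alt]
  rw [pv_init (PySem.List.sorted domain (fun x => x) false)]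
  exact pv_fold (PySem.List.sorted domain (fun x => x) false) hnd relation (fun _ _ => 0)
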